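-- pv_equiv track=rewrite | github.com/chen-xihang/DynamicProgramming | max_weighted_sum.py | max_weighted_sum
-- ===== SOURCE A (Python) =====
-- def max_weighted_sum(arr):
--     if not arr:
--         return 0
--     n = len(arr)
--     if n == 1:
--         return arr[0] * 1
--
--     dp = [0] * (n + 1)
--     dp[0] = 0
--     dp[1] = arr[0] * 1  # first element at position 0 gets weight 1
--
--     for i in range(2, n + 1):
--         # i represents considering first i elements (indices 0..i-1)
--         # No swap at position i-2, i-1
--         no_swap = dp[i-1] + arr[i-1] * i
--
--         # Swap at position i-2, i-1
--         swap = dp[i-2] + arr[i-1] * (i-1) + arr[i-2] * i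
--
--         dp[i] = max(no_swap, swap)
--
--     return dp[n]
-- ===== SOURCE B (Python) =====
-- def max_weighted_sum(arr):
--     # base weighted sum, plus a house-robber DP over adjacent-swap gains
--     base = 0
--     for j, x in enumerate(arr):
--         base += x * (j + 1)
--     prev = cur = 0
--     for j in range(len(arr) - 1):
--         prev, cur = cur, max(cur, prev + (arr[j] - arr[j + 1]))
--     return base + cur
-- ===== Notes on version B (the rewrite author's own statement) =====
-- stated objective: alternative
-- what changed: Replaces the O(n)-space dp-array recurrence over prefix values with a one-pass base weighted sum plus a two-variable house-robber DP over the adjacent-swap gains arr[j]-arr[j+1].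
import Mathlib
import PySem

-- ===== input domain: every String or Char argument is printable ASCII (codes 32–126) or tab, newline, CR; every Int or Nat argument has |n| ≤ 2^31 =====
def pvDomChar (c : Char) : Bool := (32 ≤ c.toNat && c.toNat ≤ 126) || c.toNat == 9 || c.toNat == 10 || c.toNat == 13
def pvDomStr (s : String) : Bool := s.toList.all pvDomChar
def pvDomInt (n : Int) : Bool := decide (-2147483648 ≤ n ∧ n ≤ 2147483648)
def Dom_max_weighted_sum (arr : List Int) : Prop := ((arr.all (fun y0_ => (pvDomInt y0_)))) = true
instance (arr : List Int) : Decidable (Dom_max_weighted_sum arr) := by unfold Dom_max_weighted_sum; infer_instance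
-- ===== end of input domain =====

-- B replaces A's dp-array prefix recurrence by a base weighted sum plus a two-variable
-- house-robber DP over adjacent-swap gains (alternative decomposition, O(1) extra space).

-- ===== PORT A =====
-- the body of A's `for i in range(2, n+1)` loop (dp is indexed with Nat i, always in range)
def pvStepA (arr : List Int) (dp : List Int) (i : Nat) : List Int :=
  let no_swap := dp.getD (i-1) 0 + arr.getD (i-1) 0 * (i : Int)
  let swap := dp.getD (i-2) 0 + arr.getD (i-1) 0 * ((i : Int) - 1) + arr.getD (i-2) 0 * (i : Int)
  dp.set i (max no_swap swap)

def max_weighted_sum (arr : List Int) : Int :=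
  if arr = [] then 0
  else
    let n := arr.length
    if n = 1 then arr.getD 0 0 * 1
    else
      -- dp = [0]*(n+1); dp[0] = 0 (already); dp[1] = arr[0]*1
      let dp1 := (List.replicate (n+1) (0:Int)).set 1 (arr.getD 0 0 * 1)
      let dp := (List.range' 2 (n-1)).foldl (pvStepA arr) dp1
      dp.getD n 0

-- ===== PORT B =====
-- Source B's first loop body:  base += x * (j + 1)
def pvBaseStep (s : Int) (p : Int × Int) : Int := s + p.2 * (p.1 + 1)
-- Source B's second loop body:  prev, cur = cur, max(cur, prev + (arr[j] - arr[j+1]))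
def pvHrStep (arr : List Int) (pc : Int × Int) (j : Nat) : Int × Int :=
  (pc.2, max pc.2 (pc.1 + (arr.getD j 0 - arr.getD (j+1) 0)))

def max_weighted_sum_alt (arr : List Int) : Int :=
  let base := (PySem.List.enumerate arr 0).foldl pvBaseStep 0
  let hr := (List.range (arr.length - 1)).foldl (pvHrStep arr) (0, 0)
  base + hr.2

-- ===== PRECONDITION & SPEC =====
def Spec_max_weighted_sum (arr : List Int) (out : Int) : Prop := out = max_weighted_sum_alt arr
instance (arr : List Int) (out : Int) : Decidable (Spec_max_weighted_sum arr out) := by unfold Spec_max_weighted_sum; infer_instance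

-- ===== CLAIM (what is proved, stated in full; the proofs are below) =====
def Claim_equal_max_weighted_sum : Prop := ∀ (arr : List Int), Dom_max_weighted_sum arr → Spec_max_weighted_sum arr (max_weighted_sum arr)

-- ===== LEMMAS AND PROOFS =====

-- A's dp[i], as a two-step recurrence
def dpA (arr : List Int) : Nat → Int
  | 0 => 0
  | 1 => arr.getD 0 0
  | (i+2) => max (dpA arr (i+1) + arr.getD (i+1) 0 * ((i : Int) + 2))
                 (dpA arr i + arr.getD (i+1) 0 * ((i : Int) + 1) + arr.getD i 0 * ((i : Int) + 2))

-- house-robber optimum over the first i-1 gains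
def Hrob (arr : List Int) : Nat → Int
  | 0 => 0
  | 1 => 0
  | (i+2) => max (Hrob arr (i+1)) (Hrob arr i + (arr.getD i 0 - arr.getD (i+1) 0))

-- weighted sum of the first m elements
def baseW (arr : List Int) : Nat → Int
  | 0 => 0
  | (i+1) => baseW arr i + arr.getD i 0 * ((i : Int) + 1)

-- what B's first loop accumulates, structurally
def wsum : List Int → Int → Int
  | [], _ => 0
  | (x :: xs), s => x * (s + 1) + wsum xs (s + 1)

lemma dpA_eq (arr : List Int) (i : Nat) : dpA arr i = baseW arr i + Hrob arr i := by
  have key : ∀ j, (dpA arr j = baseW arr j + Hrob arr j) ∧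
      (dpA arr (j+1) = baseW arr (j+1) + Hrob arr (j+1)) := by
    intro j
    induction j with
    | zero => simp [dpA, baseW, Hrob]
    | succ k ih =>
      refine ⟨ih.2, ?_⟩
      show dpA arr (k+2) = baseW arr (k+2) + Hrob arr (k+2)
      have h1 := ih.1
      have h2 := ih.2
      simp only [dpA, Hrob, baseW, h1, h2]
      set b := arr.getD k 0
      set a := arr.getD (k+1) 0
      set c := (k : Int)
      set X := baseW arr k + b * (c + 1) + a * (c + 2) with hX
      have e1 : baseW arr k + b * (c + 1) + Hrob arr (k+1) + a * (c + 2)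
          = X + Hrob arr (k+1) := by rw [hX]; ring
      have e2 : baseW arr k + Hrob arr k + a * (c + 1) + b * (c + 2)
          = X + (Hrob arr k + (b - a)) := by rw [hX]; ring
      rw [e1, e2, max_add_add_left, hX]
      push_cast
      ring
  exact (key i).1

lemma hrob_fold (arr : List Int) (m : Nat) :
    (List.range m).foldl (pvHrStep arr) (0, 0) = (Hrob arr m, Hrob arr (m+1)) := by
  induction m with
  | zero => simp [Hrob]
  | succ k ih =>
    rw [List.range_succ, List.foldl_append, ih]
    simp only [List.foldl_cons, List.foldl_nil, pvHrStep]
    show (Hrob arr (k+1), max (Hrob arr (k+1)) (Hrob arr k + (arr.getD k 0 - arr.getD (k+1) 0)))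
        = (Hrob arr (k+1), Hrob arr (k+2))
    simp [Hrob]

lemma enum_fold (xs : List Int) : ∀ (s acc : Int),
    (PySem.List.enumerate xs s).foldl pvBaseStep acc = acc + wsum xs s := by
  induction xs with
  | nil => intro s acc; simp [PySem.List.enumerate_nil, wsum]
  | cons x xs ih =>
    intro s acc
    rw [PySem.List.enumerate_cons, List.foldl_cons, ih]
    simp only [pvBaseStep, wsum]
    ring

lemma wsum_drop (arr : List Int) : ∀ (m k : Nat), k + m = arr.length →
    wsum (arr.drop k) (k : Int) = baseW arr arr.length - baseW arr k := by
  intro m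
  induction m with
  | zero =>
    intro k hk
    have : k = arr.length := by omega
    subst this
    simp [wsum]
  | succ j ih =>
    intro k hk
    have hk' : k < arr.length := by omega
    rw [List.drop_eq_getElem_cons hk']
    simp only [wsum]
    have ih' := ih (k+1) (by omega)
    push_cast at ih' ⊢
    rw [ih']
    have hb : baseW arr (k+1) = baseW arr k + arr.getD k 0 * ((k : Int) + 1) := by
      simp [baseW]
    have hg : arr.getD k 0 = arr[k] := List.getD_eq_getElem arr 0 hk'
    rw [hb, hg]
    ring

lemma wsum_eq_baseW (arr : List Int) : wsum arr 0 = baseW arr arr.length := by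
  have := wsum_drop arr arr.length 0 (by omega)
  simpa [baseW] using this

-- invariant of A's dp loop
lemma A_inv (arr : List Int) (hn : 2 ≤ arr.length) :
    ∀ m, m ≤ arr.length - 1 →
      ((List.range' 2 m).foldl (pvStepA arr)
          ((List.replicate (arr.length + 1) (0:Int)).set 1 (arr.getD 0 0 * 1))).length
        = arr.length + 1 ∧
      ∀ k, k ≤ arr.length →
        ((List.range' 2 m).foldl (pvStepA arr)
            ((List.replicate (arr.length + 1) (0:Int)).set 1 (arr.getD 0 0 * 1))).getD k 0
          = if k ≤ m + 1 then dpA arr k else 0 := by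
  intro m
  induction m with
  | zero =>
    intro _
    simp only [List.range'_zero, List.foldl_nil]
    constructor
    · simp
    · intro k hk
      rw [List.getD_eq_getElem?_getD, List.getElem?_set]
      simp only [List.getElem?_replicate, List.length_replicate]
      rcases Nat.lt_trichotomy k 1 with h | h | h
      · interval_cases k
        simp [dpA]
      · subst h
        simp only [if_pos (by omega : 1 < arr.length + 1)]
        simp [dpA]
      · have h1 : ¬ (1 = k) := by omega
        have h2 : ¬ (k ≤ 0 + 1) := by omega
        simp only [if_neg h1, if_neg h2]
        split_ifs with h3 <;> simp
  | succ j ih =>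
    intro hj
    have ihj := ih (by omega)
    rw [List.range'_concat, List.foldl_append]
    set L := (List.range' 2 j).foldl (pvStepA arr)
        ((List.replicate (arr.length + 1) (0:Int)).set 1 (arr.getD 0 0 * 1)) with hL
    simp only [List.foldl_cons, List.foldl_nil, one_mul]
    have hlen : (pvStepA arr L (2 + j)).length = arr.length + 1 := by
      simp [pvStepA, ihj.1]
    refine ⟨hlen, ?_⟩
    intro k hk
    have hidx : 2 + j ≤ arr.length := by omega
    have hget1 : L.getD (j + 1) 0 = dpA arr (j+1) := by
      have := ihj.2 (j+1) (by omega)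
      simpa using this
    have hget2 : L.getD j 0 = dpA arr j := by
      have := ihj.2 j (by omega)
      simpa using this
    have hstep : pvStepA arr L (2 + j)
        = L.set (2 + j) (max (L.getD (2+j-1) 0 + arr.getD (2+j-1) 0 * ((2+j : Nat) : Int))
            (L.getD (2+j-2) 0 + arr.getD (2+j-1) 0 * (((2+j : Nat) : Int) - 1)
              + arr.getD (2+j-2) 0 * ((2+j : Nat) : Int))) := rfl
    rw [hstep, List.getD_eq_getElem?_getD, List.getElem?_set, ihj.1]
    by_cases hkj : 2 + j = k
    · subst hkj
      have hdp : dpA arr (2 + j) = dpA arr (j + 2) := by rw [show 2 + j = j + 2 by omega]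
      rw [if_pos rfl, if_pos (by omega : 2 + j < arr.length + 1), Option.getD_some,
        if_pos (by omega : 2 + j ≤ j + 1 + 1), show 2 + j - 1 = j + 1 from by omega,
        show 2 + j - 2 = j from by omega, hget1, hget2, hdp]
      simp only [dpA]
      congr 1
      · push_cast; ring
      · congr 1 <;> push_cast <;> ring
    · simp only [if_neg hkj]
      rw [← List.getD_eq_getElem?_getD, ihj.2 k hk]
      split_ifs with h1 h2 <;> first | rfl | (exfalso; omega)

-- ===== VERDICT (by name: the statement is the Claim_ definition above) =====
theorem max_weighted_sum_spec : Claim_equal_max_weighted_sum := by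
  intro arr _
  unfold Spec_max_weighted_sum max_weighted_sum max_weighted_sum_alt
  by_cases hnil : arr = []
  · subst hnil
    simp [PySem.List.enumerate_nil]
  · simp only [if_neg hnil]
    have hbase : (PySem.List.enumerate arr 0).foldl pvBaseStep 0
        = baseW arr arr.length := by
      rw [enum_fold arr 0 0, wsum_eq_baseW]; ring_nf
    by_cases h1 : arr.length = 1
    · simp only [if_pos h1, hbase]
      rw [h1]
      simp only [show (1:Nat) - 1 = 0 from rfl, List.range_zero, List.foldl_nil]
      simp [baseW]
    · simp only [if_neg h1]
      have hn : 2 ≤ arr.length := by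
        have : arr.length ≠ 0 := by simpa using hnil
        omega
      have inv := (A_inv arr hn (arr.length - 1) (le_refl _)).2 arr.length (le_refl _)
      rw [inv]
      simp only [if_pos (by omega : arr.length ≤ arr.length - 1 + 1)]
      rw [dpA_eq, hbase, hrob_fold]
      have : arr.length - 1 + 1 = arr.length := by omega
      rw [this]
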